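-- pv_equiv track=rewrite | github.com/shuque/compactdenial | compactdenial.py | nsec_windows
-- ===== SOURCE A (Python) =====
-- def nsec_windows(type_bitmaps):
--     """
--     Iterator that returns info about the next NSEC windowed bitmap.
--     Mainly used for debugging or diagnostics.
--     """
--     for (window, bitmap) in type_bitmaps:
--         bitnumbers = []
--         for i, _ in enumerate(bitmap):
--             for j in range(0, 8):
--                 if bitmap[i] & (0x80 >> j):
--                     bitnumbers.append(i * 8 + j)
--         yield window, bitmap, bitnumbers
-- ===== SOURCE B (Python) =====
-- # 256-entry table of set-bit positions (MSB=0 .. LSB=7) per byte value, built once.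
-- BITS = [[p for p in range(8) if (v >> (7 - p)) & 1] for v in range(256)]
--
--
-- def nsec_windows(type_bitmaps):
--     """
--     Iterator that returns info about the next NSEC windowed bitmap.
--     Mainly used for debugging or diagnostics.
--     """
--     for (window, bitmap) in type_bitmaps:
--         bitnumbers = []
--         for i, byte in enumerate(bitmap):
--             bitnumbers.extend(i * 8 + p for p in BITS[byte & 0xFF])
--         yield window, bitmap, bitnumbers
-- ===== Notes on version B (the rewrite author's own statement) =====
-- stated objective: alternative
-- what changed: Replaces the per-byte inner loop over 8 shifted mask tests with a 256-entry table (precomputed once at module load) mapping each byte value to its list of set-bit positions, extended into the result per byte.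
import Mathlib
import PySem

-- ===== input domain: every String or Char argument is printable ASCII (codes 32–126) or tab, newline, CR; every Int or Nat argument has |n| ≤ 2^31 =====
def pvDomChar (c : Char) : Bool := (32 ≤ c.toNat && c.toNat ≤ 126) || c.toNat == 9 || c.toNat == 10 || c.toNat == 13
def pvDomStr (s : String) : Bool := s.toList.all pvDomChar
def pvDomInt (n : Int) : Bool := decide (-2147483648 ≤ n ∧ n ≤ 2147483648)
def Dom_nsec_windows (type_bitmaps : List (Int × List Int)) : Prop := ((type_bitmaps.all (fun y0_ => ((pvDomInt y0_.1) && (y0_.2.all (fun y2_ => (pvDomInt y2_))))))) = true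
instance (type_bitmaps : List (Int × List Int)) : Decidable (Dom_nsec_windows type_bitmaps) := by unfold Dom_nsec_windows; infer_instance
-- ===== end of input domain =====

-- B replaces A's per-byte inner loop of 8 shifted-mask tests by a 256-entry table of
-- set-bit positions precomputed once (objective: alternative; return value only — both
-- Pythons are generators, compared after listing).

-- ===== PORT A =====
-- for each (window, bitmap): for i,_ in enumerate(bitmap): for j in range(8):
--   if bitmap[i] & (0x80 >> j): bitnumbers.append(i*8+j)
-- bitmap[i] with i from enumerate is always in range, so pyGetD's default is unreachable.
def nsec_windows (type_bitmaps : List (Int × List Int)) : List (Int × List Int × List Int) :=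
  type_bitmaps.map (fun wb =>
    (wb.1, wb.2,
      (PySem.List.enumerate wb.2).foldl (fun bitnumbers iv =>
        (PySem.List.pyRange 0 8 1).foldl (fun bn2 j =>
          if PySem.Int.band (PySem.List.pyGetD wb.2 iv.1 0) ((128 : Int) >>> j.toNat) ≠ 0 then
            bn2 ++ [iv.1 * 8 + j]
          else bn2) bitnumbers) []))

-- ===== PORT B =====
-- BITS = [[p for p in range(8) if (v >> (7 - p)) & 1] for v in range(256)]
def pvBITS : List (List Int) :=
  (PySem.List.pyRange 0 256 1).map (fun (v : Int) =>
    (PySem.List.pyRange 0 8 1).filter (fun p =>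
      decide (PySem.Int.band (v >>> ((7 : Int) - p).toNat) 1 ≠ 0)))

-- for i, byte in enumerate(bitmap): bitnumbers.extend(i*8 + p for p in BITS[byte & 0xFF])
def nsec_windows_alt (type_bitmaps : List (Int × List Int)) : List (Int × List Int × List Int) :=
  type_bitmaps.map (fun wb =>
    (wb.1, wb.2,
      (PySem.List.enumerate wb.2).foldl (fun bitnumbers iv =>
        bitnumbers ++
          (PySem.List.pyGetD pvBITS (PySem.Int.band iv.2 255) []).map (fun p => iv.1 * 8 + p)) []))

-- ===== PRECONDITION & SPEC =====
def Spec_nsec_windows (type_bitmaps : List (Int × List Int)) (out : List (Int × List Int × List Int)) : Prop := out = nsec_windows_alt type_bitmaps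
instance (type_bitmaps : List (Int × List Int)) (out : List (Int × List Int × List Int)) : Decidable (Spec_nsec_windows type_bitmaps out) := by unfold Spec_nsec_windows; infer_instance

-- ===== CLAIM (what is proved, stated in full; the proofs are below) =====
def Claim_equal_nsec_windows : Prop := ∀ (type_bitmaps : List (Int × List Int)), Dom_nsec_windows type_bitmaps → Spec_nsec_windows type_bitmaps (nsec_windows type_bitmaps)

-- ===== LEMMAS AND PROOFS =====

-- low-8-bit test against a single mask 0x80>>t agrees with testing bit 7-t of the byte value
set_option maxRecDepth 16384 in
theorem pvN2 : ∀ u : Fin 256, ∀ t : Fin 8,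
    (PySem.Int.band ((u.val : Int)) ((128 : Int) >>> ((t.val : Nat) : Int)) ≠ 0) ↔
    (PySem.Int.band (((u.val : Int)) >>> ((7 - t.val : Nat))) 1 ≠ 0) := by decide

set_option maxRecDepth 16384 in
theorem pvN3 : ∀ t : Fin 8, ∀ u : Fin 256,
    (128 >>> t.val) - ((128 >>> t.val) &&& u.val) = (255 - u.val) &&& (128 >>> t.val) := by decide

theorem pvAndLow (m w : Nat) (hm : m < 256) : m &&& w = m &&& (w % 256) := by
  have h1 : m &&& w < 256 := lt_of_le_of_lt Nat.and_le_left hm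
  have h2 := @Nat.and_mod_two_pow m w 8
  have e : (2 : Nat) ^ 8 = 256 := by norm_num
  rw [e, Nat.mod_eq_of_lt h1, Nat.mod_eq_of_lt hm] at h2
  exact h2

theorem pvMask255 (w : Nat) : 255 &&& w = w % 256 := by
  rw [Nat.land_comm]
  have := Nat.and_two_pow_sub_one_eq_mod w 8
  norm_num at this
  exact this

theorem pvBandNeg (v : Int) (hv : ¬ 0 ≤ v) (m : Nat) :
    PySem.Int.band v (m : Int) = ((m - (m &&& (-v - 1).toNat) : Nat) : Int) := by
  simp [PySem.Int.band, hv]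

theorem pvBand255 (v : Int) : PySem.Int.band v 255 = v % 256 := by
  by_cases hv : 0 ≤ v
  · obtain ⟨n, rfl⟩ := Int.eq_ofNat_of_zero_le hv
    have h1 : PySem.Int.band (n : Int) 255 = ((n &&& 255 : Nat) : Int) := by
      exact_mod_cast PySem.Int.band_natCast n 255
    rw [h1, Nat.land_comm, pvMask255]
    omega
  · have hv' : v = -(((-v - 1).toNat : Int)) - 1 := by omega
    set w := (-v - 1).toNat with hwdef
    have hna : ¬ (0 : Int) ≤ v := by omega
    have hbranch : PySem.Int.band v 255 = ((255 - (255 &&& w) : Nat) : Int) := by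
      simpa [← hwdef] using pvBandNeg v hna 255
    rw [hbranch, pvMask255 w]
    omega

theorem pvBandLow (v : Int) (t : Nat) (ht : t < 8) :
    PySem.Int.band v ((128 : Int) >>> ((t : Nat) : Int))
      = PySem.Int.band (v % 256) ((128 : Int) >>> ((t : Nat) : Int)) := by
  have hms : ((128 : Int) >>> ((t : Nat) : Int)) = (((128 >>> t : Nat)) : Int) := by
    interval_cases t <;> rfl
  rw [hms]
  have hmlt : 128 >>> t < 256 := by interval_cases t <;> decide
  by_cases hv : 0 ≤ v
  · obtain ⟨n, rfl⟩ := Int.eq_ofNat_of_zero_le hv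
    have e2 : ((n : Int) % (256 : Int)) = ((n % 256 : Nat) : Int) := by omega
    rw [e2, PySem.Int.band_natCast, PySem.Int.band_natCast]
    have : n &&& (128 >>> t) = (n % 256) &&& (128 >>> t) := by
      rw [Nat.land_comm n _, Nat.land_comm (n % 256) _, pvAndLow _ n hmlt]
    exact_mod_cast this
  · have hv' : v = -(((-v - 1).toNat : Int)) - 1 := by omega
    set w := (-v - 1).toNat with hwdef
    have hna : ¬ (0 : Int) ≤ v := by omega
    have h1 : PySem.Int.band v ((128 >>> t : Nat) : Int) =
        (((128 >>> t) - ((128 >>> t) &&& w) : Nat) : Int) := by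
      rw [pvBandNeg v hna (128 >>> t), ← hwdef]
    have h2 : v % 256 = ((255 - w % 256 : Nat) : Int) := by omega
    rw [h1, h2, PySem.Int.band_natCast]
    have hu : w % 256 < 256 := Nat.mod_lt _ (by norm_num)
    have hfin := pvN3 ⟨t, ht⟩ ⟨w % 256, hu⟩
    simp only [] at hfin
    rw [pvAndLow _ w hmlt]
    exact_mod_cast hfin

theorem pvPerByte (v : Int) :
    (PySem.List.pyRange 0 8 1).filter
        (fun j => decide (PySem.Int.band v ((128 : Int) >>> j.toNat) ≠ 0))
      = PySem.List.pyGetD pvBITS (PySem.Int.band v 255) [] := by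
  rw [pvBand255]
  have h0 : (0 : Int) ≤ v % 256 := Int.emod_nonneg v (by norm_num)
  have h1 : v % 256 < 256 := Int.emod_lt_of_pos v (by norm_num)
  unfold pvBITS
  rw [PySem.List.pyGetD_map_pyRange_of_nonneg _ 256 (v % 256) [] h0 h1]
  apply List.filter_congr
  intro j hj
  rw [PySem.List.mem_pyRange_one] at hj
  have ht : j.toNat < 8 := by omega
  have e7 : ((7 : Int) - j).toNat = 7 - j.toNat := by omega
  rw [e7]
  apply decide_eq_decide.mpr
  rw [pvBandLow v j.toNat ht]
  have hr : v % 256 = (((v % 256).toNat : Nat) : Int) := by omega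
  have hr2 : (v % 256).toNat < 256 := by omega
  rw [hr]
  exact pvN2 ⟨(v % 256).toNat, hr2⟩ ⟨j.toNat, ht⟩

theorem pvFoldlIf (P : Int → Prop) [DecidablePred P] (g : Int → Int) (l : List Int)
    (acc : List Int) :
    l.foldl (fun a j => if P j then a ++ [g j] else a) acc
      = acc ++ (l.filter (fun j => decide (P j))).map g := by
  induction l generalizing acc with
  | nil => simp
  | cons h t ih =>
    by_cases hp : P h <;> simp [hp, ih, List.append_assoc]

theorem pvStep (bm : List Int) (iv : Int × Int) (hiv : iv ∈ PySem.List.enumerate bm 0)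
    (acc : List Int) :
    (PySem.List.pyRange 0 8 1).foldl (fun bn2 j =>
        if PySem.Int.band (PySem.List.pyGetD bm iv.1 0) ((128 : Int) >>> j.toNat) ≠ 0 then
          bn2 ++ [iv.1 * 8 + j]
        else bn2) acc
      = acc ++ (PySem.List.pyGetD pvBITS (PySem.Int.band iv.2 255) []).map
          (fun p => iv.1 * 8 + p) := by
  obtain ⟨k, hk, hp⟩ := (PySem.List.mem_enumerate_iff bm 0 iv).mp hiv
  subst hp
  have hget : PySem.List.pyGetD bm ((0 : Int) + (k : Int)) 0 = bm[k] := by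
    rw [zero_add, PySem.List.pyGetD_natCast, List.getD_eq_getElem?_getD,
      List.getElem?_eq_getElem hk, Option.getD_some]
  dsimp only
  rw [pvFoldlIf]
  rw [hget, pvPerByte (bm[k])]

-- ===== VERDICT (by name: the statement is the Claim_ definition above) =====
theorem nsec_windows_spec : Claim_equal_nsec_windows := by
  unfold Claim_equal_nsec_windows
  intro tbs _
  unfold Spec_nsec_windows nsec_windows nsec_windows_alt
  apply List.map_congr_left
  intro wb _
  refine congrArg (fun l => (wb.1, wb.2, l)) ?_
  apply PySem.List.foldl_congr_mem'
  intro iv hiv acc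
  exact pvStep wb.2 iv hiv acc
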